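-- pv_equiv track=rewrite | github.com/DominikSchillo/Advent-of-Code-2017 | libs/aoc_04_lib.py | part_1
-- ===== SOURCE A (Python) =====
-- from typing import List
--
-- def part_1(data: List[List[str]]) -> int:
--     """"""
--     sum_1: int = 0
--     for row in data:
--         valid: bool = True
--         for i, row_i in enumerate(row):
--             for j in range(i + 1, len(row)):
--                 if (row_i == row[j]) and (i != j):
--                     valid = False
--         if valid:
--             sum_1 += 1
--     return sum_1
-- ===== SOURCE B (Python) =====
-- from typing import List
--
-- def part_1(data: List[List[str]]) -> int:
--     """Count rows with no duplicate words: per row, a hash set replaces the all-pairs scan."""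
--     return sum(1 for row in data if len(set(row)) == len(row))
-- ===== Notes on version B (the rewrite author's own statement) =====
-- stated objective: faster
-- what changed: Replaced the O(m^2) all-pairs duplicate scan per row (with a valid flag and nested index loops) by a one-line count of rows where len(set(row)) == len(row), a hash-set dedup per row.
import Mathlib
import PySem

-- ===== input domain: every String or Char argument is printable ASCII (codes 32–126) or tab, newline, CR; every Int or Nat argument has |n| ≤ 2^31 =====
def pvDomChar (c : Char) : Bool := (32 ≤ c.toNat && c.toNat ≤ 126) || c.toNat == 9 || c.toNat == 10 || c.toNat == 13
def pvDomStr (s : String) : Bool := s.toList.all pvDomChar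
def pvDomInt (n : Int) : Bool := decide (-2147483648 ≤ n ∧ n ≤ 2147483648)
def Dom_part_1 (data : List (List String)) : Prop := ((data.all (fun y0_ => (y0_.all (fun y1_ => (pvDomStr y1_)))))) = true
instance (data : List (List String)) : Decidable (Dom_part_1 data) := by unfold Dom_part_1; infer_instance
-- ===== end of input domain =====

-- B replaces A's per-row all-pairs duplicate scan by a hash-set dedup count.

-- ===== PORT A =====
-- literal transliteration of A: outer loop over rows, valid flag, nested i/j index loops
def part_1 (data : List (List String)) : Int :=
  data.foldl (fun sum_1 row =>
    let valid : Bool :=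
      (PySem.List.enumerate row).foldl (fun valid p =>
        (PySem.List.pyRange (p.1 + 1) (PySem.List.len row) 1).foldl (fun v j =>
          if p.2 == PySem.List.pyGetD row j "" && !(p.1 == j) then false else v) valid) true
    if valid then sum_1 + 1 else sum_1) 0

-- ===== PORT B =====
-- literal transliteration of B: sum(1 for row in data if len(set(row)) == len(row))
def part_1_alt (data : List (List String)) : Int :=
  (data.countP (fun row => PySem.Set.len (PySem.Set.ofList row) == PySem.List.len row) : Int)

-- ===== PRECONDITION & SPEC =====
def Spec_part_1 (data : List (List String)) (out : Int) : Prop := out = part_1_alt data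
instance (data : List (List String)) (out : Int) : Decidable (Spec_part_1 data out) := by unfold Spec_part_1; infer_instance

-- ===== CLAIM (what is proved, stated in full; the proofs are below) =====
def Claim_equal_part_1 : Prop := ∀ (data : List (List String)), Dom_part_1 data → Spec_part_1 data (part_1 data)

-- ===== LEMMAS AND PROOFS =====

-- inner j-loop: the flag fold is 'b && no index satisfies the hit test'
theorem foldl_if_false {α : Type} (P : α → Bool) (l : List α) (b : Bool) :
    l.foldl (fun v j => if P j then false else v) b = (b && !l.any P) := by
  induction l generalizing b with
  | nil => simp
  | cons x t ih =>
    simp only [List.foldl_cons, List.any_cons, ih]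
    by_cases h : P x = true <;> simp [h]

-- outer i-loop: folding '&& no hit' over the enumerated words is 'all'
theorem foldl_and_all {α : Type} (q : α → Bool) (l : List α) (b : Bool) :
    l.foldl (fun v p => v && q p) b = (b && l.all q) := by
  induction l generalizing b with
  | nil => simp
  | cons x t ih => simp [List.foldl_cons, ih, Bool.and_assoc]

-- A's per-row flag is true exactly when the row has no duplicate word
theorem valid_eq_nodup (row : List String) :
    ((PySem.List.enumerate row).foldl (fun valid p =>
        (PySem.List.pyRange (p.1 + 1) (PySem.List.len row) 1).foldl (fun v j =>
          if p.2 == PySem.List.pyGetD row j "" && !(p.1 == j) then false else v) valid) true)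
      = decide row.Nodup := by
  have h1 : ∀ (p : Int × String) (v : Bool),
      ((PySem.List.pyRange (p.1 + 1) (PySem.List.len row) 1).foldl (fun v j =>
          if p.2 == PySem.List.pyGetD row j "" && !(p.1 == j) then false else v) v)
      = (v && !(PySem.List.pyRange (p.1 + 1) (PySem.List.len row) 1).any
            (fun j => p.2 == PySem.List.pyGetD row j "" && !(p.1 == j))) := by
    intro p v; exact foldl_if_false _ _ v
  simp only [h1]
  rw [foldl_and_all]
  rw [Bool.true_and, Bool.eq_iff_iff, List.all_eq_true, decide_eq_true_iff]
  constructor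
  · intro h
    rw [List.nodup_iff_getElem?_ne_getElem?]
    intro i j hij hj hEq
    have hi : i < row.length := lt_trans hij hj
    have hmem : ((0:Int) + (i:Int), row[i]) ∈ PySem.List.enumerate row := by
      rw [PySem.List.mem_enumerate_iff]
      exact ⟨i, hi, rfl⟩
    have := h _ hmem
    rw [Bool.not_eq_eq_eq_not, Bool.not_true, List.any_eq_false] at this
    have hjmem : ((j:Int)) ∈ PySem.List.pyRange (((0:Int) + (i:Int), row[i]).1 + 1) (PySem.List.len row) 1 := by
      rw [PySem.List.mem_pyRange_one]
      constructor
      · simp; omega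
      · simp [PySem.List.len]; omega
    have hfalse := this _ hjmem
    apply hfalse
    have hget : PySem.List.pyGetD row ((j:Int)) "" = row[j] := by
      rw [PySem.List.pyGetD_of_nonneg row "" (by positivity)]
      simp [List.getD, hj]
    simp only [hget]
    have : row[i] = row[j] := by
      rw [List.getElem?_eq_getElem hi, List.getElem?_eq_getElem hj] at hEq
      exact Option.some.inj hEq
    simp [this]
    omega
  · intro h p hp
    rw [PySem.List.mem_enumerate_iff] at hp
    obtain ⟨k, hk, rfl⟩ := hp
    rw [Bool.not_eq_eq_eq_not, Bool.not_true, List.any_eq_false]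
    intro j hj
    rw [PySem.List.mem_pyRange_one] at hj
    simp only [PySem.List.len] at hj
    have hj0 : 0 ≤ j := by omega
    have hjlt : j.toNat < row.length := by omega
    have hget : PySem.List.pyGetD row j "" = row[j.toNat] := by
      rw [PySem.List.pyGetD_of_nonneg row "" hj0]
      simp [List.getD, hjlt]
    simp only [hget]
    rw [List.nodup_iff_getElem?_ne_getElem?] at h
    have hne : row[k] ≠ row[j.toNat] := by
      have hklt : k < j.toNat := by omega
      have := h k j.toNat hklt hjlt
      intro hEq
      apply this
      rw [List.getElem?_eq_getElem hk, List.getElem?_eq_getElem hjlt, hEq]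
    simp [hne]

-- a Set.add fold grows by at most the number of elements folded in
theorem foldl_add_length_le (xs : List String) (s : PySem.Set String) :
    (xs.foldl PySem.Set.add s).length ≤ s.length + xs.length := by
  induction xs generalizing s with
  | nil => simp
  | cons x t ih =>
    simp only [List.foldl_cons, List.length_cons]
    have := ih (PySem.Set.add s x)
    have hadd : (PySem.Set.add s x).length ≤ s.length + 1 := by
      unfold PySem.Set.add
      split <;> simp
    omega

-- the fold reaches full length exactly when the new elements are fresh and distinct
theorem foldl_add_length_eq_iff (xs : List String) (s : PySem.Set String) :
    (xs.foldl PySem.Set.add s).length = s.length + xs.length ↔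
      xs.Nodup ∧ ∀ x ∈ xs, x ∉ s := by
  induction xs generalizing s with
  | nil => simp
  | cons x t ih =>
    simp only [List.foldl_cons, List.length_cons, List.nodup_cons, List.mem_cons]
    by_cases hx : PySem.Set.contains s x = true
    · have hx' : x ∈ s := List.mem_of_elem_eq_true (by simpa [PySem.Set.contains] using hx)
      have hadd : PySem.Set.add s x = s := by unfold PySem.Set.add; simp [hx']
      rw [hadd]
      constructor
      · intro h
        exfalso
        have := foldl_add_length_le t s
        omega
      · rintro ⟨-, h⟩
        exact absurd hx' (h x (Or.inl rfl))
    · have hx' : x ∉ s := fun hmem => hx (by simpa [PySem.Set.contains] using List.elem_eq_true_of_mem hmem)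
      have hadd : PySem.Set.add s x = s ++ [x] := by unfold PySem.Set.add; simp [hx']
      rw [hadd]
      have ihx := ih (s ++ [x])
      simp only [List.length_append, List.length_singleton] at ihx
      rw [show List.length s + (t.length + 1) = List.length s + 1 + t.length by omega, ihx]
      constructor
      · rintro ⟨hnd, hfresh⟩
        refine ⟨⟨fun hxt => (hfresh x hxt) (by simp), hnd⟩, ?_⟩
        rintro y (rfl | hyt)
        · exact hx'
        · intro hys
          exact (hfresh y hyt) (by simp [hys])
      · rintro ⟨⟨hxt, hnd⟩, hfresh⟩
        refine ⟨hnd, fun y hyt hy => ?_⟩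
        rcases List.mem_append.mp hy with hys | hyx
        · exact (hfresh y (Or.inr hyt)) hys
        · have hyx' : y = x := by simpa using hyx
          exact hxt (hyx' ▸ hyt)

-- B's per-row test is true exactly when the row has no duplicate word
theorem setlen_eq_nodup (row : List String) :
    (PySem.Set.len (PySem.Set.ofList row) == PySem.List.len row) = decide row.Nodup := by
  rw [Bool.eq_iff_iff, beq_iff_eq, decide_eq_true_iff]
  unfold PySem.Set.len PySem.List.len PySem.Set.ofList
  rw [Int.natCast_inj]
  have := foldl_add_length_eq_iff row PySem.Set.empty
  simp only [PySem.Set.empty] at this ⊢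
  rw [show (List.length ([] : List String)) = 0 from rfl] at this
  constructor
  · intro h
    exact ((this.mp (by omega))).1
  · intro h
    have : (row.foldl PySem.Set.add []).length = 0 + row.length :=
      (foldl_add_length_eq_iff row []).mpr ⟨h, by simp⟩
    omega

-- ===== VERDICT (by name: the statement is the Claim_ definition above) =====
theorem part_1_spec : Claim_equal_part_1 := by
  intro data _
  show part_1 data = part_1_alt data
  unfold part_1 part_1_alt
  simp only [valid_eq_nodup]
  rw [PySem.List.foldl_count_if (fun row => decide row.Nodup) data 0]
  simp only [setlen_eq_nodup]
  simp
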